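-- pv_equiv track=rewrite | github.com/najafi-laboratory/behavior | Data Analysis/cam_scope_sync/cam_scope_farz.py | find_onset_frames
-- ===== SOURCE A (Python) =====
-- def find_onset_frames(etl_list, threshold=1):
--     onset_indices = []
--     recording = False
--
--     for i, voltage in enumerate(etl_list):
--         if voltage >= threshold and not recording:
--             onset_indices.append(i)
--             recording = True
--
--         elif voltage < threshold and recording:
--             recording = False
--
--     return onset_indices
-- ===== SOURCE B (Python) =====
-- def find_onset_frames(etl_list, threshold=1):
--     # Stateless edge detection: index i is an onset iff the value crosses
--     # the threshold upward relative to its predecessor (a virtual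
--     # below-threshold value precedes the first element).
--     pairs = zip([threshold - 1] + etl_list, etl_list)
--     return [i for i, (prev, v) in enumerate(pairs) if prev < threshold <= v]
-- ===== Notes on version B (the rewrite author's own statement) =====
-- stated objective: simpler
-- what changed: Replaces the stateful single pass with a 'recording' boolean by a stateless comprehension over adjacent pairs (zip of the list with itself shifted by one), selecting exactly the upward threshold crossings.
import Mathlib
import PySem

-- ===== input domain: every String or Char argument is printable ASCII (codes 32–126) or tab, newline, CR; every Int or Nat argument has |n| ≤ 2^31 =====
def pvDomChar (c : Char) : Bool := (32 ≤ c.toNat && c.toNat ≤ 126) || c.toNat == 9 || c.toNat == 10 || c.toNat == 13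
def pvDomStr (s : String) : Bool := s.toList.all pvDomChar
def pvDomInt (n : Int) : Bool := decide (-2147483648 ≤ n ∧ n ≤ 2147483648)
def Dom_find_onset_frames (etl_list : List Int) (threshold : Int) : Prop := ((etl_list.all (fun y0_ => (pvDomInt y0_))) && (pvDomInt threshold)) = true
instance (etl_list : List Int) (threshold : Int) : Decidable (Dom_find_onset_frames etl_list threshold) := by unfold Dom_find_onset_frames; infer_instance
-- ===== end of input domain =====

-- B replaces A's stateful pass (the `recording` flag) with a stateless scan of
-- adjacent pairs selecting upward threshold crossings; objective: simpler.

-- ===== PORT A =====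
def find_onset_frames (etl_list : List Int) (threshold : Int) : List Int :=
  ((PySem.List.enumerate etl_list).foldl
    (fun (s : List Int × Bool) iv =>
      if iv.2 ≥ threshold ∧ s.2 = false then (s.1 ++ [iv.1], true)
      else if iv.2 < threshold ∧ s.2 = true then (s.1, false)
      else s)
    ([], false)).1

-- ===== PORT B =====
def find_onset_frames_alt (etl_list : List Int) (threshold : Int) : List Int :=
  (PySem.List.enumerate (List.zip ((threshold - 1) :: etl_list) etl_list)).filterMap
    (fun x => if x.2.1 < threshold ∧ threshold ≤ x.2.2 then some x.1 else none)

-- ===== PRECONDITION & SPEC =====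
def Spec_find_onset_frames (etl_list : List Int) (threshold : Int) (out : List Int) : Prop := out = find_onset_frames_alt etl_list threshold
instance (etl_list : List Int) (threshold : Int) (out : List Int) : Decidable (Spec_find_onset_frames etl_list threshold out) := by unfold Spec_find_onset_frames; infer_instance

-- ===== CLAIM (what is proved, stated in full; the proofs are below) =====
def Claim_equal_find_onset_frames : Prop := ∀ (etl_list : List Int) (threshold : Int), Dom_find_onset_frames etl_list threshold → Spec_find_onset_frames etl_list threshold (find_onset_frames etl_list threshold)

-- ===== LEMMAS AND PROOFS =====

-- Invariant: A's `recording` flag equals "the previous element p is ≥ threshold".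
theorem find_onset_go (t : Int) : ∀ (l : List Int) (p : Int) (s : Int) (acc : List Int),
    ((PySem.List.enumerate l s).foldl
      (fun (st : List Int × Bool) iv =>
        if iv.2 ≥ t ∧ st.2 = false then (st.1 ++ [iv.1], true)
        else if iv.2 < t ∧ st.2 = true then (st.1, false)
        else st)
      (acc, decide (t ≤ p))).1
    = acc ++ (PySem.List.enumerate (List.zip (p :: l) l) s).filterMap
        (fun x => if x.2.1 < t ∧ t ≤ x.2.2 then some x.1 else none) := by
  intro l
  induction l with
  | nil => intro p s acc; simp [PySem.List.enumerate_nil]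
  | cons v vs ih =>
    intro p s acc
    by_cases hv : t ≤ v <;> by_cases hp : t ≤ p <;>
      simp only [List.zip_cons_cons, PySem.List.enumerate_cons, List.foldl_cons,
        List.filterMap_cons] <;>
      · rw [show (if (v ≥ t ∧ (decide (t ≤ p)) = false) then ((acc ++ [s], true) : List Int × Bool)
            else if v < t ∧ (decide (t ≤ p)) = true then (acc, false) else (acc, decide (t ≤ p)))
            = (if p < t ∧ t ≤ v then acc ++ [s] else acc, decide (t ≤ v)) by
              split_ifs <;> simp_all <;> omega]
        rw [ih v (s + 1)]
        by_cases hc : p < t <;> simp [hc, hv]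

-- ===== VERDICT (by name: the statement is the Claim_ definition above) =====
theorem find_onset_frames_spec : Claim_equal_find_onset_frames := by
  intro etl_list threshold _
  show _ = _
  unfold find_onset_frames find_onset_frames_alt
  have h := find_onset_go threshold etl_list (threshold - 1) 0 []
  rw [show (decide (threshold ≤ threshold - 1)) = false by simp] at h
  simpa using h
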